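-- pv_equiv track=rewrite | github.com/TKKim-dev/StrikeBallGame | src/calc.py | detect_ball
-- ===== SOURCE A (Python) =====
-- def divide(number): # 10 이상의 숫자(예: 123)를 리스트로 바꿔줌([1, 2, 3])
--     result = []
--     i = 1
--     result.append(number % 10)
--     while number // (pow(10, i)) != 0:
--         result.append(number % pow(10, i + 1) // (pow(10, i)))
--         i += 1
--     if len(result) == 2:
--         result.append(0)
--     result.reverse()
--     return result
--
-- def return_number_variety(answerList): # 현재 존재하는 정답 리스트의 모든 숫자 variety (얼마나 다양하게 존재하는지) 를 얻는다
--     result = set()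
--     for i in answerList:
--         result = result | set(divide(i))
--     return result
--
-- def detect_ball(List):
--     num_list = return_number_variety(List)
--     result = []
--     for num in num_list:
--         should_save = True
--         for i in List:
--             if not num in divide(i):
--                 should_save = False
--                 break
--         if should_save:
--             result.append(num)
--     return result
-- ===== SOURCE B (Python) =====
-- def _add_digits(n, s):
--     # add the decimal digits of n to s, most significant first
--     if n >= 10:
--         _add_digits(n // 10, s)
--     s.add(n % 10)
--
-- def _digit_set(n):
--     s = set()
--     if 10 <= n <= 99:
--         s.add(0)  # the game pads two-digit numbers to three digits with a leading zero
--     _add_digits(n, s)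
--     return s
--
-- def detect_ball(List):
--     sets = [_digit_set(i) for i in List]
--     common = set.intersection(*sets) if sets else set()
--     union = set()
--     for s in sets:
--         union |= s
--     return [num for num in union if num in common]
-- ===== Notes on version B (the rewrite author's own statement) =====
-- stated objective: faster
-- what changed: B computes one digit set per element once (by a recursive divmod that never builds divide's positional list) and intersects them, replacing A's nested loop that re-runs divide(i) for every candidate digit and every element.
-- outside the precondition, e.g. on detect_ball([-5]): A does not finish within the time limit, B returns [5]
import Mathlib
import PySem

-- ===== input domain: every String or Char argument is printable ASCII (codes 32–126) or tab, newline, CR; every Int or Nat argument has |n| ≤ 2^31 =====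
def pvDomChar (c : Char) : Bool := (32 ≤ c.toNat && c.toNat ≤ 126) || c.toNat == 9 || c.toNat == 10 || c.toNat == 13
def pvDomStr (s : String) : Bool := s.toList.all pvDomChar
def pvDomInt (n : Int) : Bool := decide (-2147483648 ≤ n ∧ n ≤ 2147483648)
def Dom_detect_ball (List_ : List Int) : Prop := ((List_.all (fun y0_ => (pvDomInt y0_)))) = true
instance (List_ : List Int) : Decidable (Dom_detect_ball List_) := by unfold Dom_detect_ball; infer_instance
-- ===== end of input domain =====

-- B replaces A's nested rescan (divide(i) recomputed for every candidate digit) by one digit set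
-- per element built once and intersected; equivalence is about the return value only.

-- ===== PORT A =====
-- while number // 10**i != 0: append number % 10**(i+1) // 10**i.  Fuel 40 only makes the
-- recursion total: inside Pre_ (0 ≤ number) and Dom (≤ 2^31 < 10^40) the loop runs < 40 times.
def divideLoop (number : Int) : Nat → Nat → List Int → List Int
  | 0, _, acc => acc
  | fuel + 1, i, acc =>
    if PySem.Int.floordiv number ((10 : Int) ^ i) ≠ 0 then
      divideLoop number fuel (i + 1)
        (acc ++ [PySem.Int.floordiv (PySem.Int.mod number ((10 : Int) ^ (i + 1))) ((10 : Int) ^ i)])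
    else acc

def divide (number : Int) : List Int :=
  let r := divideLoop number 40 1 [PySem.Int.mod number 10]
  (if r.length = 2 then r ++ [0] else r).reverse

def return_number_variety (answerList : List Int) : PySem.Set Int :=
  answerList.foldl (fun result i => PySem.Set.union result (PySem.Set.ofList (divide i))) PySem.Set.empty

-- inner 'for i in List: if not num in divide(i): should_save = False; break'
def shouldSaveLoop (num : Int) : List Int → Bool
  | [] => true
  | i :: rest => if num ∈ divide i then shouldSaveLoop num rest else false

def detect_ball (List_ : List Int) : List Int :=
  (return_number_variety List_).foldl
    (fun result num => if shouldSaveLoop num List_ then result ++ [num] else result) []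

-- ===== PORT B =====
-- _add_digits(n, s): recursion on n // 10, most significant digit inserted first
def addDigits (n : Int) (s : PySem.Set Int) : PySem.Set Int :=
  if _h : 10 ≤ n then
    PySem.Set.add (addDigits (PySem.Int.floordiv n 10) s) (PySem.Int.mod n 10)
  else
    PySem.Set.add s (PySem.Int.mod n 10)
termination_by n.toNat
decreasing_by
  rw [PySem.Int.floordiv_eq_ediv_of_pos (by norm_num)]
  omega

def digitSet (n : Int) : PySem.Set Int :=
  addDigits n (if 10 ≤ n ∧ n ≤ 99 then PySem.Set.add PySem.Set.empty 0 else PySem.Set.empty)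

-- set.intersection(*sets) if sets else set()
def commonOf (sets : List (PySem.Set Int)) : PySem.Set Int :=
  match sets with
  | [] => PySem.Set.empty
  | s :: rest => rest.foldl (fun acc t => PySem.Set.inter acc t) s

def detect_ball_alt (List_ : List Int) : List Int :=
  ((List_.map digitSet).foldl (fun acc s => PySem.Set.union acc s) PySem.Set.empty).filter
    (fun num => PySem.Set.contains (commonOf (List_.map digitSet)) num)

-- ===== PRECONDITION & SPEC =====
-- Pre_ excludes negative elements: on them A's divide loops forever (number // 10**i is -1 for
-- every i), so A never returns there.
def Pre_detect_ball (List_ : List Int) : Prop := ∀ x ∈ List_, 0 ≤ x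
instance (List_ : List Int) : Decidable (Pre_detect_ball List_) := by unfold Pre_detect_ball; infer_instance
def pvWitness_detect_ball : List Int := [123, 23, 0]

def Spec_detect_ball (List_ : List Int) (out : List Int) : Prop := out = detect_ball_alt List_
instance (List_ : List Int) (out : List Int) : Decidable (Spec_detect_ball List_ out) := by unfold Spec_detect_ball; infer_instance

-- ===== CLAIM (what is proved, stated in full; the proofs are below) =====
def Claim_equal_detect_ball : Prop := ∀ (List_ : List Int), Dom_detect_ball List_ → Pre_detect_ball List_ → Spec_detect_ball List_ (detect_ball List_)

-- ===== LEMMAS AND PROOFS =====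

-- decimal digits of n, least significant first, with digits 0 = [0] (what divide's first append gives)
def digitsOr0 (n : Nat) : List Nat := if n = 0 then [0] else Nat.digits 10 n

def castList (l : List Nat) : List Int := l.map Int.ofNat

lemma castList_cons (a : Nat) (l : List Nat) : castList (a :: l) = (a : Int) :: castList l := rfl
lemma castList_append (l1 l2 : List Nat) : castList (l1 ++ l2) = castList l1 ++ castList l2 := by
  simp [castList]
lemma castList_reverse (l : List Nat) : castList l.reverse = (castList l).reverse := by
  simp [castList]
lemma castList_length (l : List Nat) : (castList l).length = l.length := by simp [castList]

lemma digitsOr0_eq (n : Nat) : digitsOr0 n = n % 10 :: Nat.digits 10 (n / 10) := by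
  unfold digitsOr0
  rcases Nat.eq_zero_or_pos n with h0 | h0
  · subst h0; simp
  · rw [if_neg (by omega), Nat.digits_def' (by norm_num) h0]

lemma digitsOr0_len2 (n : Nat) : (digitsOr0 n).length = 2 ↔ (10 ≤ n ∧ n ≤ 99) := by
  rw [digitsOr0_eq]
  rcases Nat.eq_zero_or_pos (n / 10) with h1 | h1
  · rw [h1]; simp; omega
  · rw [Nat.digits_def' (by norm_num) h1]
    rcases Nat.eq_zero_or_pos (n / 10 / 10) with h2 | h2
    · rw [h2]; simp; omega
    · rw [Nat.digits_def' (by norm_num) h2]; simp; omega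

lemma floordiv_cast (n k : Nat) : PySem.Int.floordiv (n : Int) (k : Int) = ((n / k : Nat) : Int) := by
  exact_mod_cast PySem.Int.floordiv_natCast n k

lemma mod_cast' (n k : Nat) : PySem.Int.mod (n : Int) (k : Int) = ((n % k : Nat) : Int) := by
  exact_mod_cast PySem.Int.mod_natCast n k

lemma L_loop : ∀ (fuel i : Nat) (n : Nat) (acc : List Int), n < 10 ^ (i + fuel) →
    divideLoop (n : Int) fuel i acc = acc ++ castList (Nat.digits 10 (n / 10 ^ i)) := by
  intro fuel
  induction fuel with
  | zero =>
    intro i n acc h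
    have : n / 10 ^ i = 0 := Nat.div_eq_of_lt (by simpa using h)
    simp [divideLoop, this, castList]
  | succ fuel ih =>
    intro i n acc h
    have hcast : ((10 : Int)) ^ i = (((10 : Nat) ^ i : Nat) : Int) := by push_cast; ring
    have hcast1 : ((10 : Int)) ^ (i + 1) = (((10 : Nat) ^ (i + 1) : Nat) : Int) := by push_cast; ring
    rw [divideLoop.eq_def]
    simp only [hcast, hcast1, floordiv_cast, mod_cast', floordiv_cast]
    by_cases hm : n / 10 ^ i = 0
    · rw [if_neg (by simp [hm])]
      simp [hm, castList]
    · rw [if_pos (by exact_mod_cast hm)]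
      have hdig : n % 10 ^ (i + 1) / 10 ^ i = n / 10 ^ i % 10 := by
        rw [pow_succ]
        exact Nat.mod_mul_right_div_self n (10 ^ i) 10
      have hrec := ih (i + 1) n (acc ++ [((n % 10 ^ (i + 1) / 10 ^ i : Nat) : Int)])
        (by have : i + 1 + fuel = i + (fuel + 1) := by omega
            rw [this]; exact h)
      rw [hrec]
      have hdd : n / 10 ^ (i + 1) = n / 10 ^ i / 10 := by
        rw [pow_succ, Nat.div_div_eq_div_mul]
      rw [Nat.digits_def' (b := 10) (by norm_num) (Nat.pos_of_ne_zero hm), hdig, hdd,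
        castList_cons]
      simp

lemma L_divide (n : Nat) (h : n < 10 ^ 41) :
    divide (n : Int) =
      castList ((if (digitsOr0 n).length = 2 then digitsOr0 n ++ [0] else digitsOr0 n).reverse) := by
  have hloop := L_loop 40 1 n [PySem.Int.mod (n : Int) 10] (by simpa using h)
  have hm : PySem.Int.mod (n : Int) 10 = ((n % 10 : Nat) : Int) := by
    exact_mod_cast PySem.Int.mod_natCast n 10
  have hbase : [PySem.Int.mod (n : Int) 10] ++ castList (Nat.digits 10 (n / 10 ^ 1))
      = castList (digitsOr0 n) := by
    rw [digitsOr0_eq, hm, castList_cons]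
    simp
  simp only [divide, hloop, hbase]
  by_cases h2 : (digitsOr0 n).length = 2
  · rw [if_pos (by rw [castList_length]; exact h2), if_pos h2]
    rw [castList_reverse, castList_append]
    simp [castList]
  · rw [if_neg (by rw [castList_length]; exact h2), if_neg h2]
    rw [castList_reverse]

lemma L_addDigits : ∀ (n : Nat) (s : PySem.Set Int),
    addDigits (n : Int) s = (castList (digitsOr0 n).reverse).foldl PySem.Set.add s := by
  intro n
  induction n using Nat.strong_induction_on with
  | _ n ih =>
    intro s
    have hfd : PySem.Int.floordiv ((n : Nat) : Int) 10 = ((n / 10 : Nat) : Int) := by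
      exact_mod_cast PySem.Int.floordiv_natCast n 10
    have hmd : PySem.Int.mod ((n : Nat) : Int) 10 = ((n % 10 : Nat) : Int) := by
      exact_mod_cast PySem.Int.mod_natCast n 10
    rw [addDigits]
    by_cases h10 : 10 ≤ n
    · rw [dif_pos (by exact_mod_cast h10)]
      have hq : n / 10 ≠ 0 := by omega
      have hqlt : n / 10 < n := Nat.div_lt_self (by omega) (by norm_num)
      rw [hfd, hmd, ih (n / 10) hqlt s]
      rw [digitsOr0_eq n]
      have hdd : Nat.digits 10 (n / 10) = digitsOr0 (n / 10) := by
        unfold digitsOr0; rw [if_neg hq]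
      rw [hdd, List.reverse_cons, castList_append, List.foldl_append, castList_cons]
      rfl
    · rw [dif_neg (by exact_mod_cast h10)]
      rw [hmd]
      rcases Nat.eq_zero_or_pos n with h0 | h0
      · subst h0; simp [digitsOr0, castList]
      · have hone : digitsOr0 n = [n % 10] := by
          rw [digitsOr0_eq, Nat.div_eq_of_lt (by omega)]
          simp
        rw [hone]
        simp [castList]

lemma L_digitSet (n : Nat) (h : n < 10 ^ 41) :
    digitSet (n : Int) = PySem.Set.ofList (divide (n : Int)) := by
  rw [PySem.Set.ofList_eq_foldl, L_divide n h]
  unfold digitSet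
  rw [L_addDigits]
  by_cases h2 : (digitsOr0 n).length = 2
  · have hrange : 10 ≤ n ∧ n ≤ 99 := (digitsOr0_len2 n).mp h2
    rw [if_pos h2, if_pos (by constructor <;> [exact_mod_cast hrange.1; exact_mod_cast hrange.2])]
    rw [List.reverse_append, castList_append, List.foldl_append]
    rfl
  · have hrange : ¬ (10 ≤ n ∧ n ≤ 99) := fun hc => h2 ((digitsOr0_len2 n).mpr hc)
    rw [if_neg h2, if_neg (by intro hc; exact hrange ⟨by exact_mod_cast hc.1, by exact_mod_cast hc.2⟩)]
    rfl

lemma shouldSave_iff (num : Int) : ∀ (l : List Int),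
    shouldSaveLoop num l = true ↔ ∀ i ∈ l, num ∈ divide i := by
  intro l
  induction l with
  | nil => simp [shouldSaveLoop]
  | cons i rest ih =>
    unfold shouldSaveLoop
    by_cases hmem : num ∈ divide i
    · rw [if_pos hmem, ih]
      simp [hmem]
    · rw [if_neg hmem]
      simp [hmem]

lemma mem_foldl_inter (num : Int) : ∀ (rest : List (PySem.Set Int)) (s : PySem.Set Int),
    num ∈ rest.foldl (fun acc t => PySem.Set.inter acc t) s ↔ num ∈ s ∧ ∀ t ∈ rest, num ∈ t := by
  intro rest
  induction rest with
  | nil => simp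
  | cons t rest ih =>
    intro s
    simp only [List.foldl_cons, ih, PySem.Set.mem_inter]
    constructor
    · rintro ⟨⟨h1, h2⟩, h3⟩
      refine ⟨h1, ?_⟩
      intro u hu
      rcases List.mem_cons.mp hu with rfl | hu
      · exact h2
      · exact h3 u hu
    · rintro ⟨h1, h2⟩
      exact ⟨⟨h1, h2 t (by simp)⟩, fun u hu => h2 u (by simp [hu])⟩

-- ===== VERDICT (by name: the statement is the Claim_ definition above) =====
theorem detect_ball_spec : Claim_equal_detect_ball := by
  intro List_ hDom hPre
  unfold Spec_detect_ball
  have hdig : ∀ i ∈ List_, digitSet i = PySem.Set.ofList (divide i) := by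
    intro i hi
    have h1 : (0 : Int) ≤ i := hPre i hi
    have h2 : i ≤ 2147483648 := by
      have hd := List.all_eq_true.mp hDom i hi
      simp only [pvDomInt, decide_eq_true_eq] at hd
      exact hd.2
    have h3 : i = ((i.toNat : Nat) : Int) := by omega
    rw [h3]
    refine L_digitSet i.toNat ?_
    have : (10 : Nat) ^ 41 = 100000000000000000000000000000000000000000 := by norm_num
    omega
  cases List_ with
  | nil => rfl
  | cons x xs =>
    unfold detect_ball detect_ball_alt return_number_variety commonOf
    have hU : ((x :: xs).map digitSet).foldl (fun acc s => PySem.Set.union acc s) PySem.Set.empty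
        = (x :: xs).foldl (fun result i => PySem.Set.union result (PySem.Set.ofList (divide i))) PySem.Set.empty := by
      rw [List.foldl_map]
      exact PySem.List.foldl_congr_mem _ _ _ _ (fun acc i hi => by rw [hdig i hi])
    have hpred : ∀ num : Int,
        PySem.Set.contains ((xs.map digitSet).foldl (fun acc t => PySem.Set.inter acc t) (digitSet x)) num
        = shouldSaveLoop num (x :: xs) := by
      intro num
      have hiff : (PySem.Set.contains ((xs.map digitSet).foldl (fun acc t => PySem.Set.inter acc t) (digitSet x)) num = true)
          ↔ (shouldSaveLoop num (x :: xs) = true) := by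
        rw [PySem.Set.contains_iff, mem_foldl_inter, shouldSave_iff]
        rw [hdig x (by simp), PySem.Set.mem_ofList]
        constructor
        · rintro ⟨h1, h2⟩ i hi
          rcases List.mem_cons.mp hi with hi | hi
          · subst hi; exact h1
          · have := h2 (digitSet i) (List.mem_map_of_mem hi)
            rwa [hdig i (by simp [hi]), PySem.Set.mem_ofList] at this
        · rintro h
          refine ⟨h x (by simp), ?_⟩
          intro t ht
          rcases List.mem_map.mp ht with ⟨i, hi, rfl⟩
          rw [hdig i (by simp [hi]), PySem.Set.mem_ofList]
          exact h i (by simp [hi])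
      cases hc : PySem.Set.contains ((xs.map digitSet).foldl (fun acc t => PySem.Set.inter acc t) (digitSet x)) num
        <;> cases hs : shouldSaveLoop num (x :: xs) <;> simp_all
    simp only [List.map_cons] at hU ⊢
    rw [hU]
    rw [PySem.List.foldl_append_if_eq_filter (fun num => shouldSaveLoop num (x :: xs))]
    rw [List.nil_append]
    refine (List.filter_congr ?_).symm
    intro num _
    exact hpred num
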